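-- pv_equiv track=rewrite | github.com/pypi-data/pypi-mirror-162 | packages/siumaai/siumaai-0.0.2.tar.gz/siumaai-0.0.2/siumaai/features/utils.py | add_pad_for_2d_labels
-- ===== SOURCE A (Python) =====
-- def add_pad_for_2d_labels(word_ids, labels, pad_id, token_type_ids, label_all_tokens=False, required_token_type_id=0, return_criterion_mask=False):
--
--     new_labels = [[pad_id for _ in word_ids] for _ in word_ids]
--     criterion_mask = [[0 for _ in word_ids] for _ in word_ids]
--     x_previous_word_id = None
--     for x_index, x_word_id in enumerate(word_ids):
--         if token_type_ids[x_index] != required_token_type_id or x_word_id is None or (label_all_tokens is False and x_previous_word_id == x_word_id):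
--             continue
--
--         y_previous_word_id = None
--         for y_index, y_word_id in enumerate(word_ids):
--             if token_type_ids[y_index] != required_token_type_id or y_word_id is None or (label_all_tokens is False and y_previous_word_id == y_word_id):
--                 continue
--
--             if y_previous_word_id != y_word_id:
--                 criterion_mask[x_index][y_index] = 1
--             new_labels[x_index][y_index] = labels[x_word_id][y_word_id]
--             y_previous_word_id = y_word_id
--
--         x_previous_word_id = x_word_id
--
--     if return_criterion_mask is False:
--         return new_labels
--     return new_labels, criterion_mask
-- ===== SOURCE B (Python) =====
-- def add_pad_for_2d_labels(word_ids, labels, pad_id, token_type_ids, label_all_tokens=False, required_token_type_id=0, return_criterion_mask=False):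
--     # Phase 1: one pass collecting the kept positions (index, word_id, criterion flag).
--     kept = []
--     prev = None
--     for i, w in enumerate(word_ids):
--         if token_type_ids[i] == required_token_type_id and w is not None and (label_all_tokens or prev != w):
--             kept.append((i, w, 1 if prev != w else 0))
--             prev = w
--     # Phase 2: build both matrices directly from the kept index map.
--     info = {i: (w, f) for i, w, f in kept}
--     n = len(word_ids)
--     new_labels = [[labels[info[x][0]][info[y][0]] if y in info else pad_id for y in range(n)]
--                   if x in info else [pad_id] * n
--                   for x in range(n)]
--     criterion_mask = [[info[y][1] if y in info else 0 for y in range(n)]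
--                       if x in info else [0] * n
--                       for x in range(n)]
--     if return_criterion_mask is False:
--         return new_labels
--     return new_labels, criterion_mask
-- ===== Notes on version B (the rewrite author's own statement) =====
-- stated objective: alternative
-- what changed: B replaces A's preallocate-then-mutate nested filtered loops (the kept-filter re-run for every kept row) by a two-phase decomposition: one pass computes the kept positions (index, word_id, criterion flag) into a dict, and both matrices are then built cell-by-cell by comprehensions with dict lookups.
-- outside the precondition, e.g. on add_pad_for_2d_labels([None], [[]], 1, [0], False, 1, False): A returns ([1],), B returns ([1],); on add_pad_for_2d_labels([0], [[5]], 0, [0], False, 0, False): A returns ([5],), B returns ([5],)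
import Mathlib
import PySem

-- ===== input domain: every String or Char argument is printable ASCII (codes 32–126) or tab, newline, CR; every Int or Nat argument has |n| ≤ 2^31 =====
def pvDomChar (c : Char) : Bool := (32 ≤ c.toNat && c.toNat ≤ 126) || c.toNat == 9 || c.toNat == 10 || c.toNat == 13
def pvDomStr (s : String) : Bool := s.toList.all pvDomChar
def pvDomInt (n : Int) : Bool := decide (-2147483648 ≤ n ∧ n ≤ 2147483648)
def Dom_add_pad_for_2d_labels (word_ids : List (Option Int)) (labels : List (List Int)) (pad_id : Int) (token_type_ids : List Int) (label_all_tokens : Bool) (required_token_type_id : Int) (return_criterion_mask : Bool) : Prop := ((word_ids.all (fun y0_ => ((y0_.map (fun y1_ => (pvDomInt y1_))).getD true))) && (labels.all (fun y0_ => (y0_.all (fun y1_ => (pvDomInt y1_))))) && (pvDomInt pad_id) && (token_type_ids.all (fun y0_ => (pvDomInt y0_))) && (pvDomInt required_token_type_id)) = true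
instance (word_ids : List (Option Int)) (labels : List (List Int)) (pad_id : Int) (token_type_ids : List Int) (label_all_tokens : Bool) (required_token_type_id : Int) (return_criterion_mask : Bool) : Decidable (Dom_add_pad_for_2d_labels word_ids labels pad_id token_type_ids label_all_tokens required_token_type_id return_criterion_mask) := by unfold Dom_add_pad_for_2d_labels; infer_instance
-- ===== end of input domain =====

-- ===== PORT A =====
-- B rebuilds the matrices from one precomputed kept-position map instead of mutating
-- preallocated matrices under nested filtered loops (objective: alternative decomposition).
-- Both Pythons return the bare new_labels list when return_criterion_mask is False and the pair
-- otherwise; under the fixed pair return type each port returns (new_labels, criterion_mask) on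
-- every input, so the equivalence proved covers both components in both modes.
def add_pad_for_2d_labels (word_ids : List (Option Int)) (labels : List (List Int)) (pad_id : Int) (token_type_ids : List Int) (label_all_tokens : Bool) (required_token_type_id : Int) (return_criterion_mask : Bool) : List (List Int) × List (List Int) :=
  -- new_labels / criterion_mask preallocation
  let new_labels0 := word_ids.map (fun _ => word_ids.map (fun _ => pad_id))
  let criterion0 := word_ids.map (fun _ => word_ids.map (fun _ => (0 : Int)))
  -- outer loop over enumerate(word_ids), state (new_labels, criterion_mask, x_previous_word_id)
  let fin := (PySem.List.enumerate word_ids).foldl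
    (fun (st : List (List Int) × List (List Int) × Option Int) xp =>
      if PySem.List.pyGetD token_type_ids xp.1 0 ≠ required_token_type_id ∨ xp.2 = none ∨
          (label_all_tokens = false ∧ st.2.2 = xp.2) then st
      else
        match xp.2 with
        | none => st
        | some x_word_id =>
          -- inner loop over enumerate(word_ids), mutating row x_index of both matrices
          let inner := (PySem.List.enumerate word_ids).foldl
            (fun (ist : List Int × List Int × Option Int) yp =>
              if PySem.List.pyGetD token_type_ids yp.1 0 ≠ required_token_type_id ∨ yp.2 = none ∨
                  (label_all_tokens = false ∧ ist.2.2 = yp.2) then ist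
              else
                match yp.2 with
                | none => ist
                | some y_word_id =>
                  (PySem.List.pySetD ist.1 yp.1
                      (PySem.List.pyGetD (PySem.List.pyGetD labels x_word_id []) y_word_id 0),
                   if ist.2.2 ≠ some y_word_id then PySem.List.pySetD ist.2.1 yp.1 1 else ist.2.1,
                   some y_word_id))
            (PySem.List.pyGetD st.1 xp.1 [], PySem.List.pyGetD st.2.1 xp.1 [], none)
          (PySem.List.pySetD st.1 xp.1 inner.1, PySem.List.pySetD st.2.1 xp.1 inner.2.1, some x_word_id))
    (new_labels0, criterion0, none)
  -- the Python returns new_labels alone (mask False) or the pair; the port carries both matrices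
  (fin.1, fin.2.1)

-- ===== PORT B =====
def add_pad_for_2d_labels_alt (word_ids : List (Option Int)) (labels : List (List Int)) (pad_id : Int) (token_type_ids : List Int) (label_all_tokens : Bool) (required_token_type_id : Int) (return_criterion_mask : Bool) : List (List Int) × List (List Int) :=
  -- Phase 1: one pass collecting the kept positions (index, word_id, criterion flag)
  let kept := ((PySem.List.enumerate word_ids).foldl
    (fun (st : List (Int × Int × Int) × Option Int) p =>
      match p.2 with
      | none => st
      | some w =>
        if PySem.List.pyGetD token_type_ids p.1 0 = required_token_type_id ∧
            (label_all_tokens = true ∨ st.2 ≠ some w) then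
          (st.1 ++ [(p.1, w, if st.2 ≠ some w then (1 : Int) else 0)], some w)
        else st)
    ([], none)).1
  -- Phase 2: build both matrices directly from the kept index map
  let info := PySem.Dict.ofList kept
  let n := word_ids.length
  let new_labels := (PySem.List.pyRange 0 (n : Int)).map (fun x =>
    match info.get? x with
    | some wf => (PySem.List.pyRange 0 (n : Int)).map (fun y =>
        match info.get? y with
        | some vf => PySem.List.pyGetD (PySem.List.pyGetD labels wf.1 []) vf.1 0
        | none => pad_id)
    | none => List.replicate n pad_id)
  let criterion_mask := (PySem.List.pyRange 0 (n : Int)).map (fun x =>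
    match info.get? x with
    | some _ => (PySem.List.pyRange 0 (n : Int)).map (fun y =>
        match info.get? y with
        | some vf => vf.2
        | none => (0 : Int))
    | none => List.replicate n (0 : Int))
  -- the Python returns new_labels alone (mask False) or the pair; the port carries both matrices
  (new_labels, criterion_mask)

-- ===== PRECONDITION & SPEC =====
-- Pre_ excludes (a) inputs where A raises IndexError (token_type_ids shorter than word_ids, or a
-- word id at a matching position outside Python index range of labels or of the accessed row) and
-- (b) return_criterion_mask = false, ONLY because there both Pythons return the bare new_labels
-- list — not a value of the declared pair return type, so the typed comparison cannot cover it;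
-- the Python B returns the identical bare list there, and the proof below never uses this
-- conjunct: the two ports agree on those inputs as well.
def Pre_add_pad_for_2d_labels (word_ids : List (Option Int)) (labels : List (List Int)) (pad_id : Int) (token_type_ids : List Int) (label_all_tokens : Bool) (required_token_type_id : Int) (return_criterion_mask : Bool) : Prop :=
  return_criterion_mask = true ∧
  word_ids.length ≤ token_type_ids.length ∧
  ∀ p ∈ word_ids.zip token_type_ids, p.2 = required_token_type_id →
    ∀ w, p.1 = some w →
      PySem.Raise.InRange labels.length w ∧
      ∀ q ∈ word_ids.zip token_type_ids, q.2 = required_token_type_id →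
        ∀ v, q.1 = some v →
          PySem.Raise.InRange (PySem.List.pyGetD labels w []).length v
instance (word_ids : List (Option Int)) (labels : List (List Int)) (pad_id : Int) (token_type_ids : List Int) (label_all_tokens : Bool) (required_token_type_id : Int) (return_criterion_mask : Bool) : Decidable (Pre_add_pad_for_2d_labels word_ids labels pad_id token_type_ids label_all_tokens required_token_type_id return_criterion_mask) := by unfold Pre_add_pad_for_2d_labels; infer_instance

def pvWitness_add_pad_for_2d_labels : List (Option Int) × List (List Int) × Int × List Int × Bool × Int × Bool :=
  ([some 0, some 1], [[5, 6], [7, 8]], -1, [0, 0], false, 0, true)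

def Spec_add_pad_for_2d_labels (word_ids : List (Option Int)) (labels : List (List Int)) (pad_id : Int) (token_type_ids : List Int) (label_all_tokens : Bool) (required_token_type_id : Int) (return_criterion_mask : Bool) (out : List (List Int) × List (List Int)) : Prop := out = add_pad_for_2d_labels_alt word_ids labels pad_id token_type_ids label_all_tokens required_token_type_id return_criterion_mask
instance (word_ids : List (Option Int)) (labels : List (List Int)) (pad_id : Int) (token_type_ids : List Int) (label_all_tokens : Bool) (required_token_type_id : Int) (return_criterion_mask : Bool) (out : List (List Int) × List (List Int)) : Decidable (Spec_add_pad_for_2d_labels word_ids labels pad_id token_type_ids label_all_tokens required_token_type_id return_criterion_mask out) := by unfold Spec_add_pad_for_2d_labels; infer_instance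

-- ===== CLAIM (what is proved, stated in full; the proofs are below) =====
def Claim_equal_add_pad_for_2d_labels : Prop := ∀ (word_ids : List (Option Int)) (labels : List (List Int)) (pad_id : Int) (token_type_ids : List Int) (label_all_tokens : Bool) (required_token_type_id : Int) (return_criterion_mask : Bool), Dom_add_pad_for_2d_labels word_ids labels pad_id token_type_ids label_all_tokens required_token_type_id return_criterion_mask → Pre_add_pad_for_2d_labels word_ids labels pad_id token_type_ids label_all_tokens required_token_type_id return_criterion_mask → Spec_add_pad_for_2d_labels word_ids labels pad_id token_type_ids label_all_tokens required_token_type_id return_criterion_mask (add_pad_for_2d_labels word_ids labels pad_id token_type_ids label_all_tokens required_token_type_id return_criterion_mask)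

-- ===== LEMMAS AND PROOFS =====

-- the sequence of kept positions (index, word id, criterion flag), shared filter of both programs
def pvKept (tti : List Int) (req : Int) (la : Bool) : List (Int × Option Int) → Option Int → List (Int × Int × Int) × Option Int
  | [], prev => ([], prev)
  | p :: l, prev =>
    match p.2 with
    | none => pvKept tti req la l prev
    | some w =>
      if PySem.List.pyGetD tti p.1 0 = req ∧ (la = true ∨ prev ≠ some w) then
        ((p.1, w, if prev ≠ some w then (1 : Int) else 0) :: (pvKept tti req la l (some w)).1,
         (pvKept tti req la l (some w)).2)
      else pvKept tti req la l prev


-- B's phase-1 fold computes pvKept (accumulator prepended)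
theorem pvKeptB_foldl (token_type_ids : List Int) (required_token_type_id : Int) (label_all_tokens : Bool) :
    ∀ (l : List (Int × Option Int)) (prev : Option Int) (acc : List (Int × Int × Int)),
    l.foldl
      (fun (st : List (Int × Int × Int) × Option Int) p =>
        match p.2 with
        | none => st
        | some w =>
          if PySem.List.pyGetD token_type_ids p.1 0 = required_token_type_id ∧
              (label_all_tokens = true ∨ st.2 ≠ some w) then
            (st.1 ++ [(p.1, w, if st.2 ≠ some w then (1 : Int) else 0)], some w)
          else st)
      (acc, prev)
    = (acc ++ (pvKept token_type_ids required_token_type_id label_all_tokens l prev).1,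
       (pvKept token_type_ids required_token_type_id label_all_tokens l prev).2) := by
  intro l
  induction l with
  | nil => intro prev acc; simp [pvKept]
  | cons p l ih =>
    intro prev acc
    rcases p with ⟨i, ow⟩
    cases ow with
    | none => simpa [pvKept] using ih prev acc
    | some w =>
      by_cases h : PySem.List.pyGetD token_type_ids i 0 = required_token_type_id ∧
          (label_all_tokens = true ∨ prev ≠ some w)
      · simp only [List.foldl_cons, pvKept, if_pos h]
        rw [ih (some w) (acc ++ [(i, w, if prev ≠ some w then (1 : Int) else 0)])]
        simp
      · simp only [List.foldl_cons, pvKept, if_neg h]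
        exact ih prev acc

-- row/mask update actions of A's inner loop, indexed by the kept entries
def pvRowStep (labels : List (List Int)) (w : Int) : List Int → (Int × Int × Int) → List Int :=
  fun r e => PySem.List.pySetD r e.1 (PySem.List.pyGetD (PySem.List.pyGetD labels w []) e.2.1 0)
def pvMaskStep : List Int → (Int × Int × Int) → List Int :=
  fun c e => if e.2.2 = 1 then PySem.List.pySetD c e.1 1 else c

-- A's inner loop = two independent folds of its updates over the kept entries
theorem pvInnerA_foldl (token_type_ids : List Int) (required_token_type_id : Int)
    (label_all_tokens : Bool) (labels : List (List Int)) (x_word_id : Int) :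
    ∀ (l : List (Int × Option Int)) (prev : Option Int) (row crow : List Int),
    l.foldl
      (fun (ist : List Int × List Int × Option Int) yp =>
        if PySem.List.pyGetD token_type_ids yp.1 0 ≠ required_token_type_id ∨ yp.2 = none ∨
            (label_all_tokens = false ∧ ist.2.2 = yp.2) then ist
        else
          match yp.2 with
          | none => ist
          | some y_word_id =>
            (PySem.List.pySetD ist.1 yp.1
                (PySem.List.pyGetD (PySem.List.pyGetD labels x_word_id []) y_word_id 0),
             if ist.2.2 ≠ some y_word_id then PySem.List.pySetD ist.2.1 yp.1 1 else ist.2.1,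
             some y_word_id))
      (row, crow, prev)
    = ((pvKept token_type_ids required_token_type_id label_all_tokens l prev).1.foldl
         (pvRowStep labels x_word_id) row,
       (pvKept token_type_ids required_token_type_id label_all_tokens l prev).1.foldl pvMaskStep crow,
       (pvKept token_type_ids required_token_type_id label_all_tokens l prev).2) := by
  intro l
  induction l with
  | nil => intro prev row crow; simp [pvKept]
  | cons p l ih =>
    intro prev row crow
    rcases p with ⟨i, ow⟩
    simp only [List.foldl_cons]
    cases ow with
    | none =>
      rw [if_pos (by simp)]
      simpa [pvKept] using ih prev row crow
    | some w =>
      by_cases hA : PySem.List.pyGetD token_type_ids i 0 ≠ required_token_type_id ∨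
          ((i, some w) : Int × Option Int).2 = none ∨
          (label_all_tokens = false ∧ ((row, crow, prev) : List Int × List Int × Option Int).2.2 = ((i, some w) : Int × Option Int).2)
      · rw [if_pos hA]
        have hk : ¬ (PySem.List.pyGetD token_type_ids i 0 = required_token_type_id ∧
            (label_all_tokens = true ∨ prev ≠ some w)) := by
          rintro ⟨h1, h2⟩
          rcases hA with a | a | ⟨a, b⟩
          · exact a h1
          · simp at a
          · rcases h2 with h2 | h2
            · rw [h2] at a; exact Bool.noConfusion a
            · exact h2 (by simpa using b)
        simp only [pvKept, if_neg hk]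
        exact ih prev row crow
      · rw [if_neg hA]
        push_neg at hA
        obtain ⟨h1, _, h3⟩ := hA
        have hk : PySem.List.pyGetD token_type_ids i 0 = required_token_type_id ∧
            (label_all_tokens = true ∨ prev ≠ some w) := by
          refine ⟨by simpa using h1, ?_⟩
          cases hla : label_all_tokens with
          | true => exact Or.inl rfl
          | false => exact Or.inr (fun hp => (h3 hla) (by simpa using hp))
        simp only [pvKept, if_pos hk, List.foldl_cons]
        rw [ih (some w)]
        have hhead : (if prev ≠ some w then PySem.List.pySetD crow i 1 else crow)
            = pvMaskStep crow (i, w, if prev ≠ some w then (1 : Int) else 0) := by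
          by_cases hp : prev = some w <;> simp [pvMaskStep, hp]
        rw [hhead]
        rfl

-- A's outer loop = fold of whole-row updates over the kept entries
theorem pvOuterA_foldl (word_ids : List (Option Int)) (labels : List (List Int))
    (token_type_ids : List Int) (required_token_type_id : Int) (label_all_tokens : Bool) :
    ∀ (l : List (Int × Option Int)) (prev : Option Int) (M C : List (List Int)),
    l.foldl
      (fun (st : List (List Int) × List (List Int) × Option Int) xp =>
        if PySem.List.pyGetD token_type_ids xp.1 0 ≠ required_token_type_id ∨ xp.2 = none ∨
            (label_all_tokens = false ∧ st.2.2 = xp.2) then st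
        else
          match xp.2 with
          | none => st
          | some x_word_id =>
            let inner := (PySem.List.enumerate word_ids).foldl
              (fun (ist : List Int × List Int × Option Int) yp =>
                if PySem.List.pyGetD token_type_ids yp.1 0 ≠ required_token_type_id ∨ yp.2 = none ∨
                    (label_all_tokens = false ∧ ist.2.2 = yp.2) then ist
                else
                  match yp.2 with
                  | none => ist
                  | some y_word_id =>
                    (PySem.List.pySetD ist.1 yp.1
                        (PySem.List.pyGetD (PySem.List.pyGetD labels x_word_id []) y_word_id 0),
                     if ist.2.2 ≠ some y_word_id then PySem.List.pySetD ist.2.1 yp.1 1 else ist.2.1,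
                     some y_word_id))
              (PySem.List.pyGetD st.1 xp.1 [], PySem.List.pyGetD st.2.1 xp.1 [], none)
            (PySem.List.pySetD st.1 xp.1 inner.1, PySem.List.pySetD st.2.1 xp.1 inner.2.1, some x_word_id))
      (M, C, prev)
    = (((pvKept token_type_ids required_token_type_id label_all_tokens l prev).1.foldl
          (fun (MC : List (List Int) × List (List Int)) e =>
            (PySem.List.pySetD MC.1 e.1
               ((pvKept token_type_ids required_token_type_id label_all_tokens
                   (PySem.List.enumerate word_ids) none).1.foldl (pvRowStep labels e.2.1)
                 (PySem.List.pyGetD MC.1 e.1 [])),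
             PySem.List.pySetD MC.2 e.1
               ((pvKept token_type_ids required_token_type_id label_all_tokens
                   (PySem.List.enumerate word_ids) none).1.foldl pvMaskStep
                 (PySem.List.pyGetD MC.2 e.1 [])))) (M, C)).1,
       ((pvKept token_type_ids required_token_type_id label_all_tokens l prev).1.foldl
          (fun (MC : List (List Int) × List (List Int)) e =>
            (PySem.List.pySetD MC.1 e.1
               ((pvKept token_type_ids required_token_type_id label_all_tokens
                   (PySem.List.enumerate word_ids) none).1.foldl (pvRowStep labels e.2.1)
                 (PySem.List.pyGetD MC.1 e.1 [])),
             PySem.List.pySetD MC.2 e.1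
               ((pvKept token_type_ids required_token_type_id label_all_tokens
                   (PySem.List.enumerate word_ids) none).1.foldl pvMaskStep
                 (PySem.List.pyGetD MC.2 e.1 [])))) (M, C)).2,
       (pvKept token_type_ids required_token_type_id label_all_tokens l prev).2) := by
  intro l
  induction l with
  | nil => intro prev M C; simp [pvKept]
  | cons p l ih =>
    intro prev M C
    rcases p with ⟨i, ow⟩
    simp only [List.foldl_cons]
    cases ow with
    | none =>
      rw [if_pos (by simp)]
      simpa [pvKept] using ih prev M C
    | some w =>
      by_cases hA : PySem.List.pyGetD token_type_ids i 0 ≠ required_token_type_id ∨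
          ((i, some w) : Int × Option Int).2 = none ∨
          (label_all_tokens = false ∧
            ((M, C, prev) : List (List Int) × List (List Int) × Option Int).2.2 = ((i, some w) : Int × Option Int).2)
      · rw [if_pos hA]
        have hk : ¬ (PySem.List.pyGetD token_type_ids i 0 = required_token_type_id ∧
            (label_all_tokens = true ∨ prev ≠ some w)) := by
          rintro ⟨h1, h2⟩
          rcases hA with a | a | ⟨a, b⟩
          · exact a h1
          · simp at a
          · rcases h2 with h2 | h2
            · rw [h2] at a; exact Bool.noConfusion a
            · exact h2 (by simpa using b)
        simp only [pvKept, if_neg hk]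
        exact ih prev M C
      · rw [if_neg hA]
        push_neg at hA
        obtain ⟨h1, _, h3⟩ := hA
        have hk : PySem.List.pyGetD token_type_ids i 0 = required_token_type_id ∧
            (label_all_tokens = true ∨ prev ≠ some w) := by
          refine ⟨by simpa using h1, ?_⟩
          cases hla : label_all_tokens with
          | true => exact Or.inl rfl
          | false => exact Or.inr (fun hp => (h3 hla) (by simpa using hp))
        simp only [pvKept, if_pos hk, List.foldl_cons]
        rw [pvInnerA_foldl token_type_ids required_token_type_id label_all_tokens labels w
          (PySem.List.enumerate word_ids) none]
        rw [ih (some w)]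

-- kept indices come from the scanned list, in order
theorem pvKept_keys_sublist (tti : List Int) (req : Int) (la : Bool) :
    ∀ (l : List (Int × Option Int)) (prev : Option Int),
    ((pvKept tti req la l prev).1.map (fun e => e.1)).Sublist (l.map (fun p => p.1)) := by
  intro l
  induction l with
  | nil => intro prev; simp [pvKept]
  | cons p l ih =>
    intro prev
    rcases p with ⟨i, ow⟩
    cases ow with
    | none =>
      simp only [pvKept, List.map_cons]
      exact (ih prev).trans (List.sublist_cons_self _ _)
    | some w =>
      by_cases h : PySem.List.pyGetD tti i 0 = req ∧ (la = true ∨ prev ≠ some w)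
      · simp only [pvKept, if_pos h, List.map_cons]
        exact (ih (some w)).cons₂ i
      · simp only [pvKept, if_neg h, List.map_cons]
        exact (ih prev).trans (List.sublist_cons_self _ _)

theorem pvKept_flag01 (tti : List Int) (req : Int) (la : Bool) :
    ∀ (l : List (Int × Option Int)) (prev : Option Int) (e : Int × Int × Int),
    e ∈ (pvKept tti req la l prev).1 → e.2.2 = 0 ∨ e.2.2 = 1 := by
  intro l
  induction l with
  | nil => intro prev e he; simp [pvKept] at he
  | cons p l ih =>
    intro prev e he
    rcases p with ⟨i, ow⟩
    cases ow with
    | none => exact ih prev e (by simpa [pvKept] using he)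
    | some w =>
      by_cases h : PySem.List.pyGetD tti i 0 = req ∧ (la = true ∨ prev ≠ some w)
      · simp only [pvKept, if_pos h, List.mem_cons] at he
        rcases he with he | he
        · subst he; by_cases hp : prev ≠ some w <;> simp [hp]
        · exact ih (some w) e he
      · exact ih prev e (by simpa [pvKept, h] using he)

-- fold of keyed writes preserves length
theorem pvFold_length {α : Type} (u : List α → (Int × Int × Int) → List α)
    (hu : ∀ m e, (u m e).length = m.length) :
    ∀ (K : List (Int × Int × Int)) (m : List α), (K.foldl u m).length = m.length := by
  intro K
  induction K with
  | nil => intro m; rfl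
  | cons e K ih => intro m; rw [List.foldl_cons, ih (u m e), hu m e]

-- pySetD at a Nat-cast in-range index is List.set
theorem pvSetD_natCast {α : Type} (xs : List α) (k : Nat) (v : α) (h : k < xs.length) :
    PySem.List.pySetD xs (k : Int) v = xs.set k v := by
  simp [PySem.List.pySetD, PySem.List.pySet?_natCast xs k v h]

theorem pvSetD_getElem?_ne {α : Type} (m : List α) (i : Int) (v : α) (j : Nat)
    (h0 : 0 ≤ i) (hne : (j : Int) ≠ i) :
    (PySem.List.pySetD m i v)[j]? = m[j]? := by
  simp only [PySem.List.pySetD, PySem.List.pySet?, PySem.List.pyIdx?, if_pos h0]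
  split_ifs with hlt
  · simp only [Option.map_some, Option.getD_some]
    exact List.getElem?_set_ne (by omega)
  · rfl

theorem pvSetD_getElem?_self {α : Type} (m : List α) (k : Nat) (v : α) (h : k < m.length) :
    (PySem.List.pySetD m (k : Int) v)[k]? = some v := by
  rw [pvSetD_natCast m k v h]
  exact List.getElem?_set_self h

-- value of A's inner row fold, keys distinct and in range
theorem pvFoldRow_getElem? (labels : List (List Int)) (w : Int) :
    ∀ (K : List (Int × Int × Int)) (m : List Int),
    (K.map (fun e => e.1)).Nodup →
    (∀ e ∈ K, ∃ k : Nat, e.1 = (k : Int) ∧ k < m.length) →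
    ∀ j : Nat,
    (K.foldl (pvRowStep labels w) m)[j]? =
      match K.find? (fun e => e.1 == (j : Int)) with
      | some e => some (PySem.List.pyGetD (PySem.List.pyGetD labels w []) e.2.1 0)
      | none => m[j]? := by
  intro K
  induction K with
  | nil => intro m _ _ j; simp
  | cons e K ih =>
    intro m hnd hb j
    obtain ⟨k, hek, hkm⟩ := hb e List.mem_cons_self
    simp only [List.map_cons, List.nodup_cons] at hnd
    rw [List.foldl_cons]
    have hm' : ∀ e' ∈ K, ∃ k' : Nat, e'.1 = (k' : Int) ∧ k' < (pvRowStep labels w m e).length := by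
      intro e' he'
      obtain ⟨k', h1, h2⟩ := hb e' (List.mem_cons_of_mem _ he')
      exact ⟨k', h1, by simpa [pvRowStep, PySem.List.length_pySetD] using h2⟩
    by_cases hj : e.1 = (j : Int)
    · rw [List.find?_cons_of_pos (by simpa using hj)]
      rw [ih (pvRowStep labels w m e) hnd.2 hm' j]
      have hnone : K.find? (fun e => e.1 == (j : Int)) = none := by
        rw [List.find?_eq_none]
        intro e' he'
        simp only [beq_iff_eq]
        intro hc
        exact hnd.1 (by rw [hj, ← hc]; exact List.mem_map_of_mem he')
      rw [hnone]
      have hkj : k = j := by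
        have hkj' : (k : Int) = (j : Int) := by rw [← hek, hj]
        exact_mod_cast hkj'
      subst hkj
      simp only [pvRowStep]
      rw [hek]
      exact pvSetD_getElem?_self m k _ hkm
    · rw [List.find?_cons_of_neg (by simpa using hj)]
      rw [ih (pvRowStep labels w m e) hnd.2 hm' j]
      cases hf : K.find? (fun e => e.1 == (j : Int)) with
      | some e' => rfl
      | none =>
        simp only [pvRowStep]
        exact pvSetD_getElem?_ne m e.1 _ j (by omega) (Ne.symm hj)

-- value of A's inner mask fold, keys distinct, flags 0/1, zeros at the keys
theorem pvFoldMask_getElem? :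
    ∀ (K : List (Int × Int × Int)) (m : List Int),
    (K.map (fun e => e.1)).Nodup →
    (∀ e ∈ K, ∃ k : Nat, e.1 = (k : Int) ∧ k < m.length ∧ (e.2.2 = 0 ∨ e.2.2 = 1) ∧ m[k]? = some 0) →
    ∀ j : Nat,
    (K.foldl pvMaskStep m)[j]? =
      match K.find? (fun e => e.1 == (j : Int)) with
      | some e => some e.2.2
      | none => m[j]? := by
  intro K
  induction K with
  | nil => intro m _ _ j; simp
  | cons e K ih =>
    intro m hnd hb j
    obtain ⟨k, hek, hkm, hf01, hm0⟩ := hb e List.mem_cons_self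
    simp only [List.map_cons, List.nodup_cons] at hnd
    rw [List.foldl_cons]
    have hne' : ∀ e' ∈ K, ∀ (j' : Nat), ((j' : Int) = e'.1) → (pvMaskStep m e)[j']? = m[j']? := by
      intro e' he' j' hj'
      have h1 : (j' : Int) ≠ e.1 := by
        intro hc
        exact hnd.1 (by rw [← hc, hj']; exact List.mem_map_of_mem he')
      by_cases h2 : e.2.2 = 1
      · simp only [pvMaskStep, if_pos h2]
        exact pvSetD_getElem?_ne m e.1 _ j' (by omega) h1
      · simp only [pvMaskStep, if_neg h2]
    have hm' : ∀ e' ∈ K, ∃ k' : Nat, e'.1 = (k' : Int) ∧ k' < (pvMaskStep m e).length ∧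
        (e'.2.2 = 0 ∨ e'.2.2 = 1) ∧ (pvMaskStep m e)[k']? = some 0 := by
      intro e' he'
      obtain ⟨k', h1, h2, h3, h4⟩ := hb e' (List.mem_cons_of_mem _ he')
      have hlen : (pvMaskStep m e).length = m.length := by
        by_cases hx : e.2.2 = 1 <;> simp [pvMaskStep, hx, PySem.List.length_pySetD]
      refine ⟨k', h1, by omega, h3, ?_⟩
      rw [hne' e' he' k' h1.symm]
      exact h4
    by_cases hj : e.1 = (j : Int)
    · rw [List.find?_cons_of_pos (by simpa using hj)]
      rw [ih (pvMaskStep m e) hnd.2 hm' j]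
      have hnone : K.find? (fun e => e.1 == (j : Int)) = none := by
        rw [List.find?_eq_none]
        intro e' he'
        simp only [beq_iff_eq]
        intro hc
        exact hnd.1 (by rw [hj, ← hc]; exact List.mem_map_of_mem he')
      rw [hnone]
      have hkj : k = j := by
        have hkj' : (k : Int) = (j : Int) := by rw [← hek, hj]
        exact_mod_cast hkj'
      subst hkj
      show (pvMaskStep m e)[k]? = some e.2.2
      rcases hf01 with h0 | h1
      · have hms : pvMaskStep m e = m := by simp [pvMaskStep, h0]
        rw [hms, hm0, h0]
      · have hms : pvMaskStep m e = PySem.List.pySetD m e.1 1 := by simp [pvMaskStep, h1]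
        rw [hms, hek, pvSetD_getElem?_self m k 1 hkm, h1]
    · rw [List.find?_cons_of_neg (by simpa using hj)]
      rw [ih (pvMaskStep m e) hnd.2 hm' j]
      cases hf : K.find? (fun e => e.1 == (j : Int)) with
      | some e' => rfl
      | none =>
        by_cases h2 : e.2.2 = 1
        · simp only [pvMaskStep, h2, if_true]
          exact pvSetD_getElem?_ne m e.1 _ j (by omega) (Ne.symm hj)
        · simp [pvMaskStep, h2]

-- value of A's outer fold of whole-row updates, keys distinct, all touched rows still initial
theorem pvFoldOuter_getElem? (labels : List (List Int)) (KI : List (Int × Int × Int))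
    (P Z : List Int) :
    ∀ (K : List (Int × Int × Int)) (M C : List (List Int)),
    (K.map (fun e => e.1)).Nodup →
    (∀ e ∈ K, ∃ k : Nat, e.1 = (k : Int) ∧ k < M.length ∧ k < C.length ∧
        M[k]? = some P ∧ C[k]? = some Z) →
    ∀ j : Nat,
    ((K.foldl
        (fun (MC : List (List Int) × List (List Int)) e =>
          (PySem.List.pySetD MC.1 e.1 (KI.foldl (pvRowStep labels e.2.1) (PySem.List.pyGetD MC.1 e.1 [])),
           PySem.List.pySetD MC.2 e.1 (KI.foldl pvMaskStep (PySem.List.pyGetD MC.2 e.1 [])))) (M, C)).1[j]? =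
        (match K.find? (fun e => e.1 == (j : Int)) with
         | some e => some (KI.foldl (pvRowStep labels e.2.1) P)
         | none => M[j]?)) ∧
    ((K.foldl
        (fun (MC : List (List Int) × List (List Int)) e =>
          (PySem.List.pySetD MC.1 e.1 (KI.foldl (pvRowStep labels e.2.1) (PySem.List.pyGetD MC.1 e.1 [])),
           PySem.List.pySetD MC.2 e.1 (KI.foldl pvMaskStep (PySem.List.pyGetD MC.2 e.1 [])))) (M, C)).2[j]? =
        (match K.find? (fun e => e.1 == (j : Int)) with
         | some e => some (KI.foldl pvMaskStep Z)
         | none => C[j]?)) := by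
  intro K
  induction K with
  | nil => intro M C _ _ j; simp
  | cons e K ih =>
    intro M C hnd hb j
    obtain ⟨k, hek, hkM, hkC, hMP, hCZ⟩ := hb e List.mem_cons_self
    simp only [List.map_cons, List.nodup_cons] at hnd
    rw [List.foldl_cons]
    simp only []
    have hget : PySem.List.pyGetD M e.1 [] = P := by
      rw [hek]
      simp only [PySem.List.pyGetD_natCast]
      rw [List.getD_eq_getElem?_getD, hMP]
      rfl
    have hgetC : PySem.List.pyGetD C e.1 [] = Z := by
      rw [hek]
      simp only [PySem.List.pyGetD_natCast]
      rw [List.getD_eq_getElem?_getD, hCZ]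
      rfl
    rw [hget, hgetC]
    have hm' : ∀ e' ∈ K, ∃ k' : Nat, e'.1 = (k' : Int) ∧
        k' < (PySem.List.pySetD M e.1 (KI.foldl (pvRowStep labels e.2.1) P)).length ∧
        k' < (PySem.List.pySetD C e.1 (KI.foldl pvMaskStep Z)).length ∧
        (PySem.List.pySetD M e.1 (KI.foldl (pvRowStep labels e.2.1) P))[k']? = some P ∧
        (PySem.List.pySetD C e.1 (KI.foldl pvMaskStep Z))[k']? = some Z := by
      intro e' he'
      obtain ⟨k', a1, a2, a3, a4, a5⟩ := hb e' (List.mem_cons_of_mem _ he')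
      have hne : (k' : Int) ≠ e.1 := by
        intro hc
        exact hnd.1 (by rw [← hc, ← a1]; exact List.mem_map_of_mem he')
      refine ⟨k', a1, by simpa [PySem.List.length_pySetD] using a2,
        by simpa [PySem.List.length_pySetD] using a3, ?_, ?_⟩
      · rw [pvSetD_getElem?_ne M e.1 _ k' (by omega) hne]; exact a4
      · rw [pvSetD_getElem?_ne C e.1 _ k' (by omega) hne]; exact a5
    have ihj := ih (PySem.List.pySetD M e.1 (KI.foldl (pvRowStep labels e.2.1) P))
      (PySem.List.pySetD C e.1 (KI.foldl pvMaskStep Z)) hnd.2 hm'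
    by_cases hj : e.1 = (j : Int)
    · rw [List.find?_cons_of_pos (by simpa using hj)]
      have hnone : K.find? (fun e => e.1 == (j : Int)) = none := by
        rw [List.find?_eq_none]
        intro e' he'
        simp only [beq_iff_eq]
        intro hc
        exact hnd.1 (by rw [hj, ← hc]; exact List.mem_map_of_mem he')
      have hkj : k = j := by
        have hkj' : (k : Int) = (j : Int) := by rw [← hek, hj]
        exact_mod_cast hkj'
      subst hkj
      constructor
      · rw [(ihj k).1, hnone]
        show (PySem.List.pySetD M e.1 (KI.foldl (pvRowStep labels e.2.1) P))[k]? =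
          some (KI.foldl (pvRowStep labels e.2.1) P)
        rw [hek]
        exact pvSetD_getElem?_self M k _ hkM
      · rw [(ihj k).2, hnone]
        show (PySem.List.pySetD C e.1 (KI.foldl pvMaskStep Z))[k]? = some (KI.foldl pvMaskStep Z)
        rw [hek]
        exact pvSetD_getElem?_self C k _ hkC
    · rw [List.find?_cons_of_neg (by simpa using hj)]
      constructor
      · rw [(ihj j).1]
        cases hf : K.find? (fun e => e.1 == (j : Int)) with
        | some e' => rfl
        | none => exact pvSetD_getElem?_ne M e.1 _ j (by omega) (Ne.symm hj)
      · rw [(ihj j).2]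
        cases hf : K.find? (fun e => e.1 == (j : Int)) with
        | some e' => rfl
        | none => exact pvSetD_getElem?_ne C e.1 _ j (by omega) (Ne.symm hj)

-- lengths through A's outer fold
theorem pvFoldOuter_length (labels : List (List Int)) (KI : List (Int × Int × Int)) :
    ∀ (K : List (Int × Int × Int)) (M C : List (List Int)),
    ((K.foldl
        (fun (MC : List (List Int) × List (List Int)) e =>
          (PySem.List.pySetD MC.1 e.1 (KI.foldl (pvRowStep labels e.2.1) (PySem.List.pyGetD MC.1 e.1 [])),
           PySem.List.pySetD MC.2 e.1 (KI.foldl pvMaskStep (PySem.List.pyGetD MC.2 e.1 [])))) (M, C)).1.length = M.length) ∧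
    ((K.foldl
        (fun (MC : List (List Int) × List (List Int)) e =>
          (PySem.List.pySetD MC.1 e.1 (KI.foldl (pvRowStep labels e.2.1) (PySem.List.pyGetD MC.1 e.1 [])),
           PySem.List.pySetD MC.2 e.1 (KI.foldl pvMaskStep (PySem.List.pyGetD MC.2 e.1 [])))) (M, C)).2.length = C.length) := by
  intro K
  induction K with
  | nil => intro M C; exact ⟨rfl, rfl⟩
  | cons e K ih =>
    intro M C
    rw [List.foldl_cons]
    simp only []
    refine ⟨?_, ?_⟩
    · rw [(ih _ _).1, PySem.List.length_pySetD]
    · rw [(ih _ _).2, PySem.List.length_pySetD]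

-- a Dict built from a nodup-key association list keeps exactly that list
theorem pvDict_items_ofList {ν : Type} :
    ∀ (K : List (Int × ν)), (K.map (fun e => e.1)).Nodup → (PySem.Dict.ofList K).items = K := by
  have haux : ∀ (K : List (Int × ν)) (d : PySem.Dict Int ν),
      (K.map (fun e => e.1)).Nodup → (∀ x ∈ K.map (fun e => e.1), d.contains x = false) →
      (K.foldl (fun acc p => acc.insert p.1 p.2) d).items = d.items ++ K := by
    intro K
    induction K with
    | nil => intro d _ _; simp
    | cons p K ih =>
      intro d hnd hc
      simp only [List.map_cons, List.nodup_cons] at hnd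
      have hcp : d.contains p.1 = false := hc p.1 (by simp)
      have hins : (d.insert p.1 p.2).items = d.items ++ [(p.1, p.2)] := by
        simp [PySem.Dict.insert, hcp]
      have hc' : ∀ x ∈ K.map (fun e => e.1), (d.insert p.1 p.2).contains x = false := by
        intro x hx
        have hxne : (p.1 == x) = false := by
          simp only [beq_eq_false_iff_ne, ne_eq]
          intro hcx
          exact hnd.1 (hcx ▸ hx)
        simp [PySem.Dict.contains, hins, hxne]
        simpa [PySem.Dict.contains] using hc x (by simp only [List.map_cons]; exact List.mem_cons_of_mem _ hx)
      rw [List.foldl_cons, ih (d.insert p.1 p.2) hnd.2 hc', hins]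
      simp
  intro K hnd
  have h0 : ∀ x ∈ K.map (fun e => e.1), (PySem.Dict.empty : PySem.Dict Int ν).contains x = false := by
    intro x _
    simp [PySem.Dict.contains, PySem.Dict.empty]
  simpa [PySem.Dict.ofList, PySem.Dict.update, PySem.Dict.empty] using haux K PySem.Dict.empty hnd h0

-- ===== VERDICT (by name: the statement is the Claim_ definition above) =====
theorem add_pad_for_2d_labels_spec : Claim_equal_add_pad_for_2d_labels := by
  intro word_ids labels pad_id token_type_ids label_all_tokens required_token_type_id
    return_criterion_mask _dom _pre
  unfold Spec_add_pad_for_2d_labels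
  simp only [add_pad_for_2d_labels, add_pad_for_2d_labels_alt]
  rw [pvOuterA_foldl word_ids labels token_type_ids required_token_type_id label_all_tokens]
  rw [pvKeptB_foldl token_type_ids required_token_type_id label_all_tokens]
  simp only [List.nil_append]
  set K := (pvKept token_type_ids required_token_type_id label_all_tokens
    (PySem.List.enumerate word_ids) none).1 with hK
  set P := word_ids.map (fun _ => pad_id) with hP
  set Z := word_ids.map (fun _ => (0 : Int)) with hZ
  set M0 := word_ids.map (fun _ => P) with hM0
  set C0 := word_ids.map (fun _ => Z) with hC0
  have hsub : (K.map (fun e => e.1)).Sublist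
      ((PySem.List.enumerate word_ids).map (fun p => p.1)) := by
    rw [hK]
    exact pvKept_keys_sublist token_type_ids required_token_type_id label_all_tokens
      (PySem.List.enumerate word_ids) none
  have hpair : (K.map (fun e => e.1)).Pairwise (· < ·) := by
    refine List.Pairwise.sublist hsub ?_
    exact (List.pairwise_map).mpr (PySem.List.pairwise_lt_enumerate word_ids 0)
  have hnd : (K.map (fun e => e.1)).Nodup := List.Pairwise.imp (fun h => ne_of_lt h) hpair
  have hmemk : ∀ e ∈ K, ∃ k : Nat, e.1 = (k : Int) ∧ k < word_ids.length := by
    intro e he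
    have h1 : e.1 ∈ (PySem.List.enumerate word_ids).map (fun p => p.1) :=
      List.Sublist.mem (List.mem_map_of_mem he) hsub
    rw [PySem.List.map_fst_enumerate word_ids 0] at h1
    rw [PySem.List.mem_pyRange_one] at h1
    exact ⟨e.1.toNat, by omega, by omega⟩
  have hflags : ∀ e ∈ K, e.2.2 = 0 ∨ e.2.2 = 1 := by
    intro e he
    exact pvKept_flag01 token_type_ids required_token_type_id label_all_tokens
      (PySem.List.enumerate word_ids) none e (by rw [← hK]; exact he)
  have hinfo : ∀ x : Int, (PySem.Dict.ofList K).get? x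
      = (K.find? (fun e => e.1 == x)).map (fun e => e.2) := by
    intro x
    simp [PySem.Dict.get?, pvDict_items_ofList K hnd]
  have hPlen : P.length = word_ids.length := by rw [hP]; simp
  have hZlen : Z.length = word_ids.length := by rw [hZ]; simp
  have hM0len : M0.length = word_ids.length := by rw [hM0]; simp
  have hC0len : C0.length = word_ids.length := by rw [hC0]; simp
  have hinit : ∀ e ∈ K, ∃ k : Nat, e.1 = (k : Int) ∧ k < M0.length ∧ k < C0.length ∧
      M0[k]? = some P ∧ C0[k]? = some Z := by
    intro e he
    obtain ⟨k, h1, h2⟩ := hmemk e he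
    refine ⟨k, h1, by omega, by omega, ?_, ?_⟩
    · rw [hM0, List.getElem?_map, List.getElem?_eq_getElem h2]; rfl
    · rw [hC0, List.getElem?_map, List.getElem?_eq_getElem h2]; rfl
  have hrowb : ∀ e' ∈ K, ∃ k : Nat, e'.1 = (k : Int) ∧ k < P.length := by
    intro e' he'
    obtain ⟨k, h1, h2⟩ := hmemk e' he'
    exact ⟨k, h1, by omega⟩
  have hmaskb : ∀ e' ∈ K, ∃ k : Nat, e'.1 = (k : Int) ∧ k < Z.length ∧
      (e'.2.2 = 0 ∨ e'.2.2 = 1) ∧ Z[k]? = some 0 := by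
    intro e' he'
    obtain ⟨k, h1, h2⟩ := hmemk e' he'
    refine ⟨k, h1, by omega, hflags e' he', ?_⟩
    rw [hZ, List.getElem?_map, List.getElem?_eq_getElem h2]; rfl
  have houter := pvFoldOuter_getElem? labels K P Z K M0 C0 hnd hinit
  have hlens := pvFoldOuter_length labels K K M0 C0
  refine Prod.ext ?_ ?_
  · -- the label matrices agree
    apply List.ext_getElem?
    intro j
    rcases Nat.lt_or_ge j word_ids.length with hjn | hjn
    · rw [(houter j).1]
      rw [PySem.List.getElem?_map_pyRange_zero _ word_ids.length j hjn]
      rw [hinfo (j : Int)]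
      cases hf : K.find? (fun e => e.1 == ((j : Nat) : Int)) with
      | none =>
        simp only [hf, Option.map_none]
        rw [hM0, List.getElem?_map, List.getElem?_eq_getElem hjn]
        rw [hP]
        simp [List.map_const']
      | some e =>
        simp only [hf, Option.map_some]
        refine congrArg some ?_
        apply List.ext_getElem?
        intro y
        rcases Nat.lt_or_ge y word_ids.length with hyn | hyn
        · rw [pvFoldRow_getElem? labels e.2.1 K P hnd hrowb y]
          rw [PySem.List.getElem?_map_pyRange_zero _ word_ids.length y hyn]
          rw [hinfo (y : Int)]
          cases hg : K.find? (fun e => e.1 == ((y : Nat) : Int)) with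
          | none =>
            simp only [hg, Option.map_none]
            rw [hP, List.getElem?_map, List.getElem?_eq_getElem hyn]
            rfl
          | some e' =>
            simp only [hg, Option.map_some]
        · have hl1 : (K.foldl (pvRowStep labels e.2.1) P).length = word_ids.length := by
            rw [pvFold_length _ (by intro m e''; simp [pvRowStep, PySem.List.length_pySetD])]
            omega
          rw [List.getElem?_eq_none_iff.mpr (by omega)]
          rw [List.getElem?_eq_none_iff.mpr (by
            simp only [List.length_map, PySem.List.length_pyRange_one]
            omega)]
    · rw [List.getElem?_eq_none_iff.mpr (by rw [hlens.1]; omega)]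
      rw [List.getElem?_eq_none_iff.mpr (by
        simp only [List.length_map, PySem.List.length_pyRange_one]
        omega)]
  · -- the criterion-mask matrices agree
    apply List.ext_getElem?
    intro j
    rcases Nat.lt_or_ge j word_ids.length with hjn | hjn
    · rw [(houter j).2]
      rw [PySem.List.getElem?_map_pyRange_zero _ word_ids.length j hjn]
      rw [hinfo (j : Int)]
      cases hf : K.find? (fun e => e.1 == ((j : Nat) : Int)) with
      | none =>
        simp only [hf, Option.map_none]
        rw [hC0, List.getElem?_map, List.getElem?_eq_getElem hjn]
        rw [hZ]
        simp [List.map_const']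
      | some e =>
        simp only [hf, Option.map_some]
        refine congrArg some ?_
        apply List.ext_getElem?
        intro y
        rcases Nat.lt_or_ge y word_ids.length with hyn | hyn
        · rw [pvFoldMask_getElem? K Z hnd hmaskb y]
          rw [PySem.List.getElem?_map_pyRange_zero _ word_ids.length y hyn]
          rw [hinfo (y : Int)]
          cases hg : K.find? (fun e => e.1 == ((y : Nat) : Int)) with
          | none =>
            simp only [hg, Option.map_none]
            rw [hZ, List.getElem?_map, List.getElem?_eq_getElem hyn]
            rfl
          | some e' =>
            simp only [hg, Option.map_some]
        · have hl1 : (K.foldl pvMaskStep Z).length = word_ids.length := by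
            rw [pvFold_length _ (by
              intro m e''
              by_cases hx : e''.2.2 = 1 <;> simp [pvMaskStep, hx, PySem.List.length_pySetD])]
            omega
          rw [List.getElem?_eq_none_iff.mpr (by omega)]
          rw [List.getElem?_eq_none_iff.mpr (by
            simp only [List.length_map, PySem.List.length_pyRange_one]
            omega)]
    · rw [List.getElem?_eq_none_iff.mpr (by rw [hlens.2]; omega)]
      rw [List.getElem?_eq_none_iff.mpr (by
        simp only [List.length_map, PySem.List.length_pyRange_one]
        omega)]
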